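-- pv_equiv track=rewrite | github.com/kcsmilak/AoC-2023 | p25.py | reduceBags2
-- ===== SOURCE A (Python) =====
-- def reduceBags2(currentBags):
--     bags = []
--     for testBag in currentBags:
--
--         componentList = []
--         for component in testBag:
--             componentList.append(component)
--
--
--         foundUsableBag = False
--         for i, bag in enumerate(bags):
--             # if the bag contains any of the components, add all
--             for component in componentList:
--                 if component in bag:
--                     foundUsableBag = True
--                     break
--             if foundUsableBag:
--                 for component in componentList:
--                     bag[component] = True
--                 break
--         if not foundUsableBag:
--             bags.append({})
--             for component in componentList:
--                 bags[len(bags)-1][component] = True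
--
--     return bags
-- ===== SOURCE B (Python) =====
-- def reduceBags2(currentBags):
--     # One pass with a component->first-bag-index reverse index: the first bag
--     # sharing a component is the minimum recorded index over the components.
--     bags = []
--     where = {}
--     for testBag in currentBags:
--         idxs = [where[c] for c in testBag if c in where]
--         if idxs:
--             k = min(idxs)
--         else:
--             k = len(bags)
--             bags.append({})
--         bag = bags[k]
--         for c in testBag:
--             bag[c] = True
--             where[c] = k
--     return bags
-- ===== Notes on version B (the rewrite author's own statement) =====
-- stated objective: alternative
-- what changed: B keeps a component->first-bag-index reverse dictionary so each testBag finds its first matching bag as the minimum recorded index of its components, instead of A's rescan of every previous bag's keys for every new bag.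
import Mathlib
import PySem

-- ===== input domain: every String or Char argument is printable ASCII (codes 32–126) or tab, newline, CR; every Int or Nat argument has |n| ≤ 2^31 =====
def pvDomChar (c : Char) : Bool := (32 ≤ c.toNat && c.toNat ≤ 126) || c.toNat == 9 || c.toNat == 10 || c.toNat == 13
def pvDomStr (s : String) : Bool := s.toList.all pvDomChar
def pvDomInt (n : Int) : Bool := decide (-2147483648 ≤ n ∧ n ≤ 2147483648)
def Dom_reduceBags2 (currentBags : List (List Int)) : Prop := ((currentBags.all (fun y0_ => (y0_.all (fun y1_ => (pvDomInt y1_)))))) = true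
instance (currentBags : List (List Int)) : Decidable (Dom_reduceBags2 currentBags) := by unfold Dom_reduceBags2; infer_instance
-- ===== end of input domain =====

-- B replaces A's rescan of all previous bags with a component->first-bag-index
-- reverse index (objective: alternative — a different algorithm of similar cost).

-- ===== PORT A =====
-- bags[i][component] = True, looped over componentList
def pvInsertAll (bag : PySem.Dict Int Bool) (comps : List Int) : PySem.Dict Int Bool :=
  comps.foldl (fun b c => b.insert c true) bag

-- A's 'for i, bag in enumerate(bags)' scan with the foundUsableBag flag and breaks:
-- returns the bag list with the first bag sharing a component updated, or none
def pvFindAdd (comps : List Int) : List (PySem.Dict Int Bool) → Option (List (PySem.Dict Int Bool))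
  | [] => none
  | bag :: rest =>
    if comps.any (fun c => bag.contains c) then
      some (pvInsertAll bag comps :: rest)
    else
      match pvFindAdd comps rest with
      | some rest' => some (bag :: rest')
      | none => none

-- one iteration of A's outer 'for testBag in currentBags' loop
def pvStepA (bags : List (PySem.Dict Int Bool)) (testBag : List Int) : List (PySem.Dict Int Bool) :=
  let componentList := testBag.foldl (fun l c => l ++ [c]) []
  match pvFindAdd componentList bags with
  | some bags' => bags'
  | none => bags ++ [pvInsertAll PySem.Dict.empty componentList]

def reduceBags2 (currentBags : List (List Int)) : List (List (Int × Bool)) :=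
  (currentBags.foldl pvStepA []).map (fun d => d.items)

-- ===== PORT B =====
-- one iteration of B's loop: state = (bags, where); where maps a component to the
-- first bag index containing it, so 'min(idxs)' is A's first matching bag
def pvStepB (st : List (PySem.Dict Int Bool) × PySem.Dict Int Int) (testBag : List Int) :
    List (PySem.Dict Int Bool) × PySem.Dict Int Int :=
  let bags := st.1
  let whr := st.2
  let idxs := testBag.filterMap (fun c => whr.get? c)
  let kb : Int × List (PySem.Dict Int Bool) :=
    match PySem.List.min? idxs (fun x => x) with
    | some k => (k, bags)
    | none => ((bags.length : Int), bags ++ [PySem.Dict.empty])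
  -- bag = bags[k]; the index is always in range when reached (k comes from 'where'
  -- or is the index of the bag just appended), so getD's default is never used
  let bag := (PySem.List.pyGet? kb.2 kb.1).getD PySem.Dict.empty
  let bw := testBag.foldl
      (fun (p : PySem.Dict Int Bool × PySem.Dict Int Int) c =>
        (p.1.insert c true, p.2.insert c kb.1)) (bag, whr)
  (kb.2.set kb.1.toNat bw.1, bw.2)

def reduceBags2_alt (currentBags : List (List Int)) : List (List (Int × Bool)) :=
  (currentBags.foldl pvStepB ([], PySem.Dict.empty)).1.map (fun d => d.items)

-- ===== PRECONDITION & SPEC =====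
def Spec_reduceBags2 (currentBags : List (List Int)) (out : List (List (Int × Bool))) : Prop := out = reduceBags2_alt currentBags
instance (currentBags : List (List Int)) (out : List (List (Int × Bool))) : Decidable (Spec_reduceBags2 currentBags out) := by unfold Spec_reduceBags2; infer_instance

-- ===== CLAIM (what is proved, stated in full; the proofs are below) =====
def Claim_equal_reduceBags2 : Prop := ∀ (currentBags : List (List Int)), Dom_reduceBags2 currentBags → Spec_reduceBags2 currentBags (reduceBags2 currentBags)

-- ===== LEMMAS AND PROOFS =====

-- first index of a bag containing component c
def pvFirstIdx (bags : List (PySem.Dict Int Bool)) (c : Int) : Option Nat :=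
  bags.findIdx? (fun bag => bag.contains c)

-- the invariant tying B's reverse index to the bag list
def pvInv (bags : List (PySem.Dict Int Bool)) (whr : PySem.Dict Int Int) : Prop :=
  ∀ c : Int, whr.get? c = (pvFirstIdx bags c).map (fun n => (n : Int))

lemma pvFindAdd_eq (comps : List Int) : ∀ bags : List (PySem.Dict Int Bool),
    pvFindAdd comps bags =
      (List.findIdx? (fun bag => comps.any (fun c => bag.contains c)) bags).map
        (fun i => bags.set i (pvInsertAll (bags.getD i PySem.Dict.empty) comps)) := by
  intro bags
  induction bags with
  | nil => rfl
  | cons bag rest ih =>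
    by_cases h : comps.any (fun c => bag.contains c) = true
    · simp [pvFindAdd, h, List.findIdx?_cons]
    · simp only [pvFindAdd, h, if_false, List.findIdx?_cons, Bool.false_eq_true]
      rw [ih]
      cases hf : List.findIdx? (fun bag => comps.any fun c => bag.contains c) rest with
      | none => simp
      | some j => simp [List.set]

lemma pvGet?_foldl_insert (comps : List Int) (k : Int) (whr : PySem.Dict Int Int) (c : Int) :
    (comps.foldl (fun w x => w.insert x k) whr).get? c
      = if c ∈ comps then some k else whr.get? c := by
  induction comps generalizing whr with
  | nil => simp
  | cons a t ih =>
    simp only [List.foldl_cons, ih, List.mem_cons]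
    by_cases ht : c ∈ t
    · simp [ht]
    · by_cases ha : c = a <;> simp [ht, ha, PySem.Dict.get?_insert]

lemma pvContains_insertAll (b : PySem.Dict Int Bool) (comps : List Int) (c : Int) :
    (pvInsertAll b comps).contains c = (b.contains c || decide (c ∈ comps)) := by
  induction comps generalizing b with
  | nil => simp [pvInsertAll]
  | cons a t ih =>
    simp only [pvInsertAll, List.foldl_cons] at *
    rw [ih, PySem.Dict.contains_insert]
    by_cases ha : c = a
    · simp [ha, List.mem_cons]
    · have hba : (c == a) = false := by simpa using ha
      simp [hba, ha, List.mem_cons]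

lemma pvFindIdx?_set_of_eq {α : Type} (p : α → Bool) (b : α) :
    ∀ (l : List α) (i : Nat), (∀ hi : i < l.length, p b = p l[i]) →
    List.findIdx? p (l.set i b) = List.findIdx? p l := by
  intro l
  induction l with
  | nil => intro i _; rfl
  | cons a t ih =>
    intro i h
    cases i with
    | zero =>
      have hpb := h (by simp)
      simp only [List.getElem_cons_zero] at hpb
      simp only [List.set_cons_zero, List.findIdx?_cons, hpb]
    | succ j =>
      have hj : ∀ hj : j < t.length, p b = p t[j] := by
        intro hj; exact h (by simpa using Nat.succ_lt_succ hj)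
      simp only [List.set_cons_succ, List.findIdx?_cons, ih j hj]

lemma pvStep_main (bags : List (PySem.Dict Int Bool)) (whr : PySem.Dict Int Int)
    (tb : List Int) (hInv : pvInv bags whr) :
    (pvStepB (bags, whr) tb).1 = pvStepA bags tb ∧
      pvInv (pvStepB (bags, whr) tb).1 (pvStepB (bags, whr) tb).2 := by
  have hIdxs : List.filterMap (fun c => whr.get? c) tb
      = List.filterMap (fun c => (pvFirstIdx bags c).map (fun n => (n : Int))) tb :=
    List.filterMap_congr (fun c _ => hInv c)
  have hComp : tb.foldl (fun l c => l ++ [c]) [] = tb := by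
    simpa using PySem.List.foldl_append_singleton tb []
  have hsplit : ∀ (k : Int) (bag : PySem.Dict Int Bool) (w : PySem.Dict Int Int),
      List.foldl (fun (p : PySem.Dict Int Bool × PySem.Dict Int Int) c =>
        (p.1.insert c true, p.2.insert c k)) (bag, w) tb
      = (List.foldl (fun b c => b.insert c true) bag tb,
          List.foldl (fun w' c => w'.insert c k) w tb) := fun k bag w =>
    PySem.List.foldl_prod_mk (fun b c => b.insert c true) (fun w' c => w'.insert c k) tb bag w
  cases hA : List.findIdx? (fun bag => tb.any (fun c => bag.contains c)) bags with
  | none =>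
    have hnone := List.findIdx?_eq_none_iff.mp hA
    have hfi : ∀ c ∈ tb, pvFirstIdx bags c = none := by
      intro c hc
      refine List.findIdx?_eq_none_iff.mpr (fun bag hb => ?_)
      have := hnone bag hb
      rw [List.any_eq_false] at this
      simpa using this c hc
    have hIdxsNil : List.filterMap (fun c => whr.get? c) tb = [] := by
      rw [hIdxs]
      refine List.filterMap_eq_nil_iff.mpr (fun c hc => ?_)
      rw [hfi c hc]; rfl
    have hmin : PySem.List.min? (List.filterMap (fun c => whr.get? c) tb) (fun x => x) = none := by
      rw [hIdxsNil]; rfl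
    have hbag : PySem.List.pyGet? (bags ++ [PySem.Dict.empty]) ((bags.length : Nat) : Int)
        = some PySem.Dict.empty := by
      rw [PySem.List.pyGet?_natCast]
      simp
    have hB : pvStepB (bags, whr) tb =
        (bags ++ [pvInsertAll PySem.Dict.empty tb],
          tb.foldl (fun w c => w.insert c (bags.length : Int)) whr) := by
      simp only [pvStepB, hmin, hbag, Option.getD_some, Int.toNat_natCast, List.set_append]
      rw [hsplit]
      simp [pvInsertAll]
    have hAstep : pvStepA bags tb = bags ++ [pvInsertAll PySem.Dict.empty tb] := by
      simp only [pvStepA, hComp, pvFindAdd_eq, hA, Option.map_none]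
    refine ⟨by rw [hB, hAstep], ?_⟩
    rw [hB]
    dsimp only
    intro c
    simp only [pvGet?_foldl_insert, pvFirstIdx, List.findIdx?_append]
    by_cases hc : c ∈ tb
    · have h1 : List.findIdx? (fun bag => bag.contains c) bags = none := hfi c hc
      have h2 : (pvInsertAll PySem.Dict.empty tb).contains c = true := by
        rw [pvContains_insertAll]; simp [hc]
      simp [hc, h1, List.findIdx?_cons, h2]
    · have h2 : (pvInsertAll PySem.Dict.empty tb).contains c = false := by
        rw [pvContains_insertAll]; simp [hc]
      simp only [List.findIdx?_cons, h2, Bool.false_eq_true, if_false, List.findIdx?_nil,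
        Option.map_none, Option.or_none, if_neg hc]
      exact hInv c
  | some i =>
    obtain ⟨hi, hPi, hjlt⟩ := List.findIdx?_eq_some_iff_getElem.mp hA
    obtain ⟨c0, hc0m, hc0⟩ := List.any_eq_true.mp hPi
    have hcontains_false : ∀ (j : Nat) (hj : j < bags.length), j < i →
        ∀ c ∈ tb, bags[j].contains c = false := by
      intro j hj hji c hc
      have h := hjlt j hji
      rw [Bool.not_eq_true, List.any_eq_false] at h
      simpa using h c hc
    have hfirst : ∀ c ∈ tb, bags[i].contains c = true → pvFirstIdx bags c = some i := by
      intro c hc hcont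
      exact List.findIdx?_eq_some_iff_getElem.mpr
        ⟨hi, hcont, fun j hji => by
          have hj : j < bags.length := Nat.lt_trans hji hi
          simp [hcontains_false j hj hji c hc]⟩
    have hLB : ∀ y ∈ List.filterMap (fun c => whr.get? c) tb, (i : Int) ≤ y := by
      intro y hy
      rw [hIdxs] at hy
      obtain ⟨c, hc, hcy⟩ := List.mem_filterMap.mp hy
      cases hfn : pvFirstIdx bags c with
      | none => rw [hfn] at hcy; simp at hcy
      | some n =>
        rw [hfn] at hcy
        simp at hcy
        obtain ⟨hnlen, hncont, -⟩ := List.findIdx?_eq_some_iff_getElem.mp hfn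
        by_contra hlt
        have hni : n < i := by omega
        have h0 := hcontains_false n hnlen hni c hc
        rw [h0] at hncont
        exact absurd hncont (by simp)
    have hMem : (i : Int) ∈ List.filterMap (fun c => whr.get? c) tb := by
      rw [hIdxs]
      exact List.mem_filterMap.mpr ⟨c0, hc0m, by rw [hfirst c0 hc0m hc0]; rfl⟩
    have hmin : PySem.List.min? (List.filterMap (fun c => whr.get? c) tb) (fun x => x)
        = some (i : Int) := by
      cases hm : PySem.List.min? (List.filterMap (fun c => whr.get? c) tb) (fun x => x) with
      | none =>
        rw [PySem.List.min?_eq_none_iff] at hm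
        rw [hm] at hMem
        exact absurd hMem (by simp)
      | some m =>
        have hmm := PySem.List.min?_mem hm
        have h1 : m ≤ (i : Int) := PySem.List.min?_isMin hm _ hMem
        have h2 : (i : Int) ≤ m := hLB m hmm
        rw [le_antisymm h1 h2]
    have hbag : PySem.List.pyGet? bags ((i : Nat) : Int) = some bags[i] := by
      rw [PySem.List.pyGet?_natCast]
      exact List.getElem?_eq_getElem hi
    have hB : pvStepB (bags, whr) tb =
        (bags.set i (pvInsertAll bags[i] tb),
          tb.foldl (fun w c => w.insert c (i : Int)) whr) := by
      simp only [pvStepB, hmin, hbag, Option.getD_some, Int.toNat_natCast]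
      rw [hsplit]
      rfl
    have hAstep : pvStepA bags tb = bags.set i (pvInsertAll bags[i] tb) := by
      simp only [pvStepA, hComp, pvFindAdd_eq, hA, Option.map_some]
      rw [List.getD_eq_getElem bags PySem.Dict.empty hi]
    refine ⟨by rw [hB, hAstep], ?_⟩
    rw [hB]
    dsimp only
    intro c
    rw [pvGet?_foldl_insert]
    by_cases hc : c ∈ tb
    · have hfi' : pvFirstIdx (bags.set i (pvInsertAll bags[i] tb)) c = some i := by
        refine List.findIdx?_eq_some_iff_getElem.mpr ⟨by simpa using hi, ?_, ?_⟩
        · simp [pvContains_insertAll, hc]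
        · intro j hji
          have hj : j < bags.length := Nat.lt_trans hji hi
          rw [List.getElem_set]
          rw [if_neg (Nat.ne_of_gt hji)]
          simp [hcontains_false j hj hji c hc]
      rw [if_pos hc, hfi']
      rfl
    · rw [if_neg hc]
      have hset : pvFirstIdx (bags.set i (pvInsertAll bags[i] tb)) c = pvFirstIdx bags c := by
        unfold pvFirstIdx
        refine pvFindIdx?_set_of_eq _ _ bags i (fun hi' => ?_)
        rw [pvContains_insertAll]
        simp [hc]
      rw [hset]
      exact hInv c

lemma pvFold_main : ∀ (l : List (List Int)) (bags : List (PySem.Dict Int Bool))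
    (whr : PySem.Dict Int Int), pvInv bags whr →
    (l.foldl pvStepB (bags, whr)).1 = l.foldl pvStepA bags := by
  intro l
  induction l with
  | nil => intro bags whr _; rfl
  | cons tb t ih =>
    intro bags whr hInv
    obtain ⟨h1, h2⟩ := pvStep_main bags whr tb hInv
    simp only [List.foldl_cons]
    have : pvStepB (bags, whr) tb = ((pvStepB (bags, whr) tb).1, (pvStepB (bags, whr) tb).2) := rfl
    rw [this, ih _ _ h2, h1]

-- ===== VERDICT (by name: the statement is the Claim_ definition above) =====
theorem reduceBags2_spec : Claim_equal_reduceBags2 := by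
  intro currentBags _
  unfold Spec_reduceBags2 reduceBags2 reduceBags2_alt
  rw [pvFold_main]
  intro c
  simp [pvFirstIdx, PySem.Dict.get?_empty]
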